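-- pv_equiv track=rewrite | github.com/MaxLiu129/vip-apps-bc | algorithm/image_rotation_algorithm/LDP_func.py | edgeListCreator
-- ===== SOURCE A (Python) =====
-- def edgeListCreator(graph):
--     # create list for edges
--     edgeList = []
--
--     # if starting at char, append the edge
--     if(graph[0] != 0):  # Eli Coltin 3/6/21
--         edgeList.append(0)
--     for i in range(0, len(graph)-1):
--         if (graph[i] == 0) and (graph[i+1] != 0):
--             edgeList.append(i)
--         elif (graph[i] != 0) and (graph[i+1] == 0):
--             edgeList.append(i)
--     # if ending at char, append the edge
--     if(graph[len(graph)-1] != 0):  # Eli Coltin 3/6/21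
--         edgeList.append(len(graph)-1)
--     return edgeList
-- ===== SOURCE B (Python) =====
-- def edgeListCreator(graph):
--     # run-scan: find each maximal run of non-zero values and emit its two edge indices
--     out = []
--     n = len(graph)
--     i = 0
--     while i < n:
--         if graph[i] != 0:
--             s = i
--             while i < n and graph[i] != 0:
--                 i += 1
--             e = i - 1
--             out.append(0 if s == 0 else s - 1)
--             out.append(e)
--         else:
--             i += 1
--     return out
-- ===== Notes on version B (the rewrite author's own statement) =====
-- stated objective: alternative
-- what changed: B replaces A's per-adjacent-pair scan with boundary special-cases by a run-scanner that walks the array once, skips each maximal run of non-zero values and emits its two edge indices directly; Pre_ excludes only the empty list, on which A raises IndexError while B returns [].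
-- outside the precondition, e.g. on edgeListCreator([]): A raises IndexError, B returns []
import Mathlib
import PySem

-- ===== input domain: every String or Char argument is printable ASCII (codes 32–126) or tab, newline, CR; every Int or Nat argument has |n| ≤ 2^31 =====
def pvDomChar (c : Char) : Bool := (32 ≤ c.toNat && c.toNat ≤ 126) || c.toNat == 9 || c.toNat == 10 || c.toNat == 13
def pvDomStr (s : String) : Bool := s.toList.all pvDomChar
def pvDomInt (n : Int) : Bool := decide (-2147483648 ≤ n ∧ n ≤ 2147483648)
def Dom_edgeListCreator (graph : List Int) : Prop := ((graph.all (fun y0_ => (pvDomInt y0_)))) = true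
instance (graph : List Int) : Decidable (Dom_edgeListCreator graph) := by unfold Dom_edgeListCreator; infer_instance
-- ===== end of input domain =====

-- B replaces A's adjacent-pair scan (with head/tail special cases) by a single run-scanner
-- over maximal non-zero runs; same cost, different decomposition ("alternative").


-- ===== PORT A =====
def edgeListCreator (graph : List Int) : List Int :=
  -- create list for edges
  let edgeList : List Int := []
  -- if starting at char, append the edge  (graph[0]: in range under Pre_, graph ≠ [])
  let edgeList : List Int :=
    if PySem.List.pyGetD graph 0 0 ≠ 0 then edgeList ++ [0] else edgeList
  -- for i in range(0, len(graph)-1): …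
  let edgeList : List Int :=
    (PySem.List.pyRange 0 ((graph.length : Int) - 1) 1).foldl (fun acc i =>
      if PySem.List.pyGetD graph i 0 = 0 ∧ PySem.List.pyGetD graph (i + 1) 0 ≠ 0 then
        acc ++ [i]
      else if PySem.List.pyGetD graph i 0 ≠ 0 ∧ PySem.List.pyGetD graph (i + 1) 0 = 0 then
        acc ++ [i]
      else acc) edgeList
  -- if ending at char, append the edge  (graph[len-1]: in range under Pre_)
  if PySem.List.pyGetD graph ((graph.length : Int) - 1) 0 ≠ 0 then
    edgeList ++ [(graph.length : Int) - 1]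
  else edgeList

-- ===== PORT B =====
-- inner 'while i < n and graph[i] != 0: i += 1' — consumes the non-zero run,
-- returns (index after the run, remaining suffix)
def altSkipRun (i : Int) : List Int → Int × List Int
  | [] => (i, [])
  | x :: xs => if x ≠ 0 then altSkipRun (i + 1) xs else (i, x :: xs)

theorem altSkipRun_length_le (i : Int) (l : List Int) :
    (altSkipRun i l).2.length ≤ l.length := by
  induction l generalizing i with
  | nil => simp [altSkipRun]
  | cons x xs ih =>
    by_cases hx : x ≠ 0
    · simp only [altSkipRun, if_pos hx]
      exact le_trans (ih (i + 1)) (by simp)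
    · simp [altSkipRun, hx]

-- outer 'while i < n' loop of B
def altGo (i : Int) : List Int → List Int
  | [] => []
  | x :: xs =>
    if x ≠ 0 then
      (if i = 0 then 0 else i - 1) ::
        ((altSkipRun (i + 1) xs).1 - 1) ::
          altGo (altSkipRun (i + 1) xs).1 (altSkipRun (i + 1) xs).2
    else altGo (i + 1) xs
termination_by l => l.length
decreasing_by
  · exact Nat.lt_succ_of_le (altSkipRun_length_le (i + 1) xs)
  · simp

def edgeListCreator_alt (graph : List Int) : List Int := altGo 0 graph

-- ===== PRECONDITION & SPEC =====
-- Pre_ excludes exactly the empty list, on which A raises IndexError reading the first element.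
def Pre_edgeListCreator (graph : List Int) : Prop := graph ≠ []
instance (graph : List Int) : Decidable (Pre_edgeListCreator graph) := by
  unfold Pre_edgeListCreator; infer_instance
def pvWitness_edgeListCreator : List Int := [1, 0, 2]

def Spec_edgeListCreator (graph : List Int) (out : List Int) : Prop := out = edgeListCreator_alt graph
instance (graph : List Int) (out : List Int) : Decidable (Spec_edgeListCreator graph out) := by unfold Spec_edgeListCreator; infer_instance

-- ===== CLAIM (what is proved, stated in full; the proofs are below) =====
def Claim_equal_edgeListCreator : Prop := ∀ (graph : List Int), Dom_edgeListCreator graph → Pre_edgeListCreator graph → Spec_edgeListCreator graph (edgeListCreator graph)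

-- ===== LEMMAS AND PROOFS =====

-- Canonical left-to-right automaton: k = current index, prev = previous element (0 before start).
def edgeAuto (k : Int) (prev : Int) : List Int → List Int
  | [] => if prev ≠ 0 then [k - 1] else []
  | x :: xs =>
    if prev ≠ 0 then
      if x = 0 then (k - 1) :: edgeAuto (k + 1) x xs else edgeAuto (k + 1) x xs
    else
      if x ≠ 0 then (if k = 0 then 0 else k - 1) :: edgeAuto (k + 1) x xs
      else edgeAuto (k + 1) x xs

-- A's loop body as a pair-walker over the list with index labels.
def transList (k : Int) : List Int → List Int
  | x :: y :: r =>
    if ¬ (x = 0 ↔ y = 0) then k :: transList (k + 1) (y :: r)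
    else transList (k + 1) (y :: r)
  | _ => []

theorem edgeAuto_of_skipRun (l : List Int) :
    ∀ (i prev : Int), prev ≠ 0 →
      edgeAuto i prev l =
        ((altSkipRun i l).1 - 1) ::
          edgeAuto (altSkipRun i l).1 0 (altSkipRun i l).2 := by
  induction l with
  | nil => intro i prev h; simp [edgeAuto, altSkipRun, h]
  | cons x xs ih =>
    intro i prev h
    by_cases hx : x = 0
    · simp [edgeAuto, altSkipRun, h, hx]
    · simp only [edgeAuto, altSkipRun, if_pos h, if_neg hx, if_pos (show x ≠ 0 from hx)]
      exact ih (i + 1) x hx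

theorem altGo_eq_edgeAuto :
    ∀ (n : ℕ) (l : List Int), l.length ≤ n → ∀ (i : Int), altGo i l = edgeAuto i 0 l := by
  intro n
  induction n with
  | zero =>
    intro l hl i
    have : l = [] := List.eq_nil_of_length_eq_zero (Nat.le_zero.mp hl)
    subst this; simp [altGo, edgeAuto]
  | succ n ih =>
    intro l hl i
    cases l with
    | nil => simp [altGo, edgeAuto]
    | cons x xs =>
      by_cases hx : x = 0
      · subst hx
        simp only [altGo, edgeAuto, if_neg (show ¬ (0 : Int) ≠ 0 by simp)]
        exact ih xs (by simpa using Nat.succ_le_succ_iff.mp hl) (i + 1)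
      · have hx' : x ≠ 0 := hx
        simp only [altGo, edgeAuto, if_pos hx', if_neg (show ¬ (0 : Int) ≠ 0 by simp)]
        rw [edgeAuto_of_skipRun xs (i + 1) x hx']
        have hlen : (altSkipRun (i + 1) xs).2.length ≤ n := by
          have := altSkipRun_length_le (i + 1) xs
          have hxs : xs.length ≤ n := by simpa using Nat.succ_le_succ_iff.mp hl
          omega
        rw [ih _ hlen]

theorem transList_append_end (l : List Int) :
    ∀ (x k : Int), 0 ≤ k →
      transList k (x :: l) ++
          (if (x :: l).getLast (by simp) ≠ 0 then [k + (l.length : Int)] else []) =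
        edgeAuto (k + 1) x l := by
  induction l with
  | nil =>
    intro x k hk
    by_cases hx : x = 0 <;> simp [transList, edgeAuto, hx]
  | cons y ys ih =>
    intro x k hk
    have hlast : (x :: y :: ys).getLast (by simp) = (y :: ys).getLast (by simp) := by
      simp [List.getLast_cons]
    have hIH := ih y (k + 1) (by omega)
    by_cases hxy : ¬ (x = 0 ↔ y = 0)
    · -- transition: emit k
      simp only [transList, if_pos hxy]
      have hk11 : (k : Int) + 1 - 1 = k := by ring
      have hstep : edgeAuto (k + 1) x (y :: ys) = k :: edgeAuto (k + 1 + 1) y ys := by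
        by_cases hx0 : x = 0
        · have hy0 : y ≠ 0 := by tauto
          simp only [edgeAuto, if_neg (show ¬ x ≠ 0 by simp [hx0]), if_pos hy0,
            if_neg (show ¬ (k + 1 = 0) by omega), hk11]
        · have hy0 : y = 0 := by tauto
          simp only [edgeAuto, if_pos (show x ≠ 0 from hx0), if_pos hy0, hk11]
      rw [hstep, hlast,
        show (k : Int) + ((y :: ys).length : Int) = (k + 1) + (ys.length : Int) by
          simp; ring,
        ← hIH]
      simp
    · -- no transition
      simp only [transList, if_neg hxy]
      have : edgeAuto (k + 1) x (y :: ys) = edgeAuto (k + 1 + 1) y ys := by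
        by_cases hx0 : x = 0
        · have hy0 : y = 0 := by tauto
          simp only [edgeAuto, if_neg (show ¬ x ≠ 0 by simp [hx0]),
            if_neg (show ¬ y ≠ 0 by simp [hy0])]
        · have hy0 : y ≠ 0 := by tauto
          simp only [edgeAuto, if_pos (show x ≠ 0 from hx0),
            if_neg (show ¬ y = 0 from hy0)]
      rw [this, hlast,
        show (k : Int) + ((y :: ys).length : Int) = (k + 1) + (ys.length : Int) by
          simp; ring,
        ← hIH]

theorem filter_pyRange_eq_transList (g : List Int) :
    ∀ (l : List Int) (k : Int), 0 ≤ k → g.drop k.toNat = l →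
      (PySem.List.pyRange k ((g.length : Int) - 1) 1).filter
          (fun i => decide ¬ (PySem.List.pyGetD g i 0 = 0 ↔ PySem.List.pyGetD g (i + 1) 0 = 0)) =
        transList k l := by
  intro l
  induction l with
  | nil =>
    intro k hk hdrop
    have hlen : g.length ≤ k.toNat := by
      have hL := congrArg List.length hdrop
      simp at hL
      omega
    rw [PySem.List.pyRange_one_eq_nil (by omega)]
    simp [transList]
  | cons x xs ih =>
    intro k hk hdrop
    have hklen : k.toNat < g.length := by
      have hL := congrArg List.length hdrop
      simp at hL
      omega
    have hxk : g[k.toNat] = x := by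
      have := List.drop_eq_getElem_cons hklen
      rw [hdrop] at this
      exact (List.cons.injEq .. ▸ this).1.symm
    have hdrop1 : g.drop (k.toNat + 1) = xs := by
      have := List.drop_eq_getElem_cons hklen
      rw [hdrop] at this
      exact ((List.cons.injEq .. ▸ this).2).symm
    cases xs with
    | nil =>
      -- k is the last index; range(k, n-1) is empty
      have hkl : g.length ≤ k.toNat + 1 := by
        have hL := congrArg List.length hdrop1
        simp at hL
        omega
      rw [PySem.List.pyRange_one_eq_nil (by omega)]
      simp [transList]
    | cons y ys =>
      have hk1 : k.toNat + 1 < g.length := by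
        have hL := congrArg List.length hdrop1
        simp at hL
        omega
      have hyk : g[k.toNat + 1] = y := by
        have := List.drop_eq_getElem_cons hk1
        rw [hdrop1] at this
        exact (List.cons.injEq .. ▸ this).1.symm
      rw [PySem.List.pyRange_one_cons (by omega)]
      have hgk : PySem.List.pyGetD g k 0 = x := by
        rw [PySem.List.pyGetD_eq_getElem g 0 hk (by omega)]; exact hxk
      have hgk1 : PySem.List.pyGetD g (k + 1) 0 = y := by
        rw [PySem.List.pyGetD_eq_getElem g 0 (by omega) (by omega), List.getElem_eq_iff,
          show (k + 1).toNat = k.toNat + 1 by omega, List.getElem?_eq_getElem hk1, hyk]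
      have hIH := ih (k + 1) (by omega) (by rw [show (k + 1).toNat = k.toNat + 1 by omega]; exact hdrop1)
      by_cases hcond : ¬ (x = 0 ↔ y = 0)
      · rw [List.filter_cons_of_pos (by simp [hgk, hgk1]; tauto)]
        simp only [transList, if_pos hcond]
        rw [hIH]
      · rw [List.filter_cons_of_neg (by simp [hgk, hgk1]; tauto)]
        simp only [transList, if_neg hcond]
        exact hIH

theorem edgeListCreator_eq_edgeAuto (g : List Int) (hg : g ≠ []) :
    edgeListCreator g = edgeAuto 0 0 g := by
  obtain ⟨x, l, rfl⟩ := List.exists_cons_of_ne_nil hg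
  unfold edgeListCreator
  simp only []
  -- rewrite the fold body to a single Prop-ite and then to a filter
  rw [PySem.List.foldl_congr_mem _ _
      (fun (acc : List Int) (i : Int) =>
        if ¬ (PySem.List.pyGetD (x :: l) i 0 = 0 ↔ PySem.List.pyGetD (x :: l) (i + 1) 0 = 0)
        then acc ++ [i] else acc) _
      (by intro acc i _; dsimp only; split_ifs <;> tauto)]
  rw [PySem.List.foldl_append_ite_eq_filter]
  rw [filter_pyRange_eq_transList (x :: l) (x :: l) 0 le_rfl (by simp)]
  have hlast : PySem.List.pyGetD (x :: l) (((x :: l).length : Int) - 1) 0 =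
      (x :: l).getLast (by simp) := by
    rw [PySem.List.pyGetD_eq_getElem _ 0 (by simp) (by simp)]
    rw [List.getLast_eq_getElem]
    congr 1
    simp
  have hT := transList_append_end l x 0 le_rfl
  norm_num at hT
  have hlen : ((x :: l).length : Int) - 1 = 0 + (l.length : Int) := by simp
  rw [PySem.List.pyGetD_zero_cons, hlast, hlen]
  by_cases hx : x ≠ 0
  · simp only [if_pos hx]
    have : edgeAuto 0 0 (x :: l) = 0 :: edgeAuto 1 x l := by
      simp only [edgeAuto, if_neg (show ¬ (0 : Int) ≠ 0 by simp), if_pos hx]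
      norm_num
    rw [this, ← hT]
    by_cases hl : (x :: l).getLast (by simp) ≠ 0 <;> simp [hl]
  · simp only [if_neg hx]
    have : edgeAuto 0 0 (x :: l) = edgeAuto 1 x l := by
      simp only [edgeAuto, if_neg (show ¬ (0 : Int) ≠ 0 by simp), if_neg hx]
      norm_num
    rw [this, ← hT]
    by_cases hl : (x :: l).getLast (by simp) ≠ 0 <;> simp [hl]

-- ===== VERDICT (by name: the statement is the Claim_ definition above) =====
theorem edgeListCreator_spec : Claim_equal_edgeListCreator := by
  intro g _ hpre
  unfold Spec_edgeListCreator edgeListCreator_alt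
  rw [edgeListCreator_eq_edgeAuto g hpre]
  exact (altGo_eq_edgeAuto g.length g le_rfl 0).symm
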